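-- pv_equiv track=rewrite | github.com/badhon1512/Artificial-Intelligence-System-project-1 | SAT Solvers/test1.py | number_hexagonal_grid
-- ===== SOURCE A (Python) =====
-- def number_hexagonal_grid(size):
--
--     identifiers = []
--     n = 1
--     row_per_direction = (2*size) - 1
--
--     row_size = size
--     is_upper = True
--     for i in range(row_per_direction):
--         row = [(i, i + 1) for i in range(n, (n+2*row_size), 2)]
--         identifiers.append(row)
--         n += 2*row_size
--
--         if row_size >= row_per_direction:
--             is_upper = False
--
--         if is_upper:
--             row_size += 1
--         else:
--             row_size -= 1
--
--     # n_identity = []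
--     # row_size = size
--     # is_upper = True
--     # for i in range(row_per_direction):
--     #
--     #     for j in range(row_size):
--     #     row = [(i, i + 1) for i in range(n, (n + 2 * row_size), 2)]
--     #     n_identity.append(row)
--     #
--     #     if row_size >= row_per_direction:
--     #         is_upper = False
--     #
--     #     if is_upper:
--     #         row_size += 1
--     #     else:
--     #         row_size -= 1
--
--
--
--     return identifiers
-- ===== SOURCE B (Python) =====
-- def number_hexagonal_grid(size):
--     # Staged: explicit row-size table, one flat list of all numbered pairs
--     # generated at once, then partition the flat list into rows by slicing.
--     sizes = list(range(size, 2 * size)) + list(range(2 * size - 2, size - 1, -1))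
--     pairs = [(v, v + 1) for v in range(1, 1 + 2 * sum(sizes), 2)]
--     grid = []
--     i = 0
--     for s in sizes:
--         grid.append(pairs[i:i + s])
--         i += s
--     return grid
-- ===== Notes on version B (the rewrite author's own statement) =====
-- stated objective: alternative
-- what changed: Replaces A's single stateful loop (is_upper flag, mutating row_size, tuples generated per row from a running counter) with three staged passes: an explicit two-range row-size table, one flat list of all numbered pairs generated at once, and a partition of that flat list into rows by slicing.
import Mathlib
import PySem

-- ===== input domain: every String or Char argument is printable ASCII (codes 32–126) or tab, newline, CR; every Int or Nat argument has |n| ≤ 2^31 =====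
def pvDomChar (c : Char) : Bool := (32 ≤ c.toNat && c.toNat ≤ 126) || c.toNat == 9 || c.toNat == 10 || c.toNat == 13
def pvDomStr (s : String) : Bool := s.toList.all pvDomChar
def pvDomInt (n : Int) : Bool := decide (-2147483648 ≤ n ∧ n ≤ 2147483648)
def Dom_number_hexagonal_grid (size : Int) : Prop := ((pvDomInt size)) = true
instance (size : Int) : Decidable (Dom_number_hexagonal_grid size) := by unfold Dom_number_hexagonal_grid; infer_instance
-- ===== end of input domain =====

-- B replaces A's single stateful loop (is_upper flag, mutating row_size) with three staged
-- passes: an explicit row-size table, one flat list of all pairs, and a recursive partition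
-- of that flat list into rows (objective: alternative).

-- ===== PORT A =====
-- literal transliteration of A: fold over range(2*size-1) carrying (identifiers, n, row_size, is_upper)
def number_hexagonal_grid (size : Int) : List (List (Int × Int)) :=
  let row_per_direction := 2 * size - 1
  (((PySem.List.pyRange 0 row_per_direction 1).foldl
      (fun (st : List (List (Int × Int)) × Int × Int × Bool) _ =>
        let ids := st.1
        let n := st.2.1
        let row_size := st.2.2.1
        let is_upper := st.2.2.2
        let row := (PySem.List.pyRange n (n + 2 * row_size) 2).map (fun i => (i, i + 1))
        let n' := n + 2 * row_size
        let is_upper' := if row_per_direction ≤ row_size then false else is_upper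
        let row_size' := if is_upper' then row_size + 1 else row_size - 1
        (ids ++ [row], n', row_size', is_upper'))
      ([], 1, size, true))).1

-- ===== PORT B =====
-- literal transliteration of B: sizes table (two ranges), flat pair list,
-- then a fold over the sizes carrying (grid, i) that slices the flat list into rows
def number_hexagonal_grid_alt (size : Int) : List (List (Int × Int)) :=
  let sizes := PySem.List.pyRange size (2 * size) 1 ++ PySem.List.pyRange (2 * size - 2) (size - 1) (-1)
  let pairs := (PySem.List.pyRange 1 (1 + 2 * sizes.sum) 2).map (fun v => (v, v + 1))
  ((sizes.foldl
      (fun (st : List (List (Int × Int)) × Int) s =>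
        (st.1 ++ [PySem.List.slice pairs (some st.2) (some (st.2 + s))], st.2 + s))
      ([], 0))).1

-- ===== PRECONDITION & SPEC =====
def Spec_number_hexagonal_grid (size : Int) (out : List (List (Int × Int))) : Prop := out = number_hexagonal_grid_alt size
instance (size : Int) (out : List (List (Int × Int))) : Decidable (Spec_number_hexagonal_grid size out) := by unfold Spec_number_hexagonal_grid; infer_instance

-- ===== CLAIM (what is proved, stated in full; the proofs are below) =====
def Claim_equal_number_hexagonal_grid : Prop := ∀ (size : Int), Dom_number_hexagonal_grid size → Spec_number_hexagonal_grid size (number_hexagonal_grid size)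

-- ===== LEMMAS AND PROOFS =====

-- A's step function (let-free restatement of the fold body in the port; connects by rfl)
def pvStepA (rpd : Int) (st : List (List (Int × Int)) × Int × Int × Bool) (_ : Int) :
    List (List (Int × Int)) × Int × Int × Bool :=
  (st.1 ++ [(PySem.List.pyRange st.2.1 (st.2.1 + 2 * st.2.2.1) 2).map (fun i => (i, i + 1))],
   st.2.1 + 2 * st.2.2.1,
   (if (if rpd ≤ st.2.2.1 then false else st.2.2.2) then st.2.2.1 + 1 else st.2.2.1 - 1),
   if rpd ≤ st.2.2.1 then false else st.2.2.2)

-- reference step over the sizes table (proof-side only; bridges A's fold to B's chunking)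
def pvStepB (st : List (List (Int × Int)) × Int) (s : Int) : List (List (Int × Int)) × Int :=
  (st.1 ++ [(PySem.List.pyRange 0 s 1).map (fun j => (st.2 + 2 * j, st.2 + 2 * j + 1))],
   st.2 + 2 * s)

-- the closed-form row size
def pvF (size r : Int) : Int := 2 * size - 1 - |r - (size - 1)|

-- the flat pair list starting at `start` with `tot` pairs
def pvPairs (start tot : Int) : List (Int × Int) :=
  (PySem.List.pyRange start (start + 2 * tot) 2).map (fun v => (v, v + 1))

-- A's row (step-2 range) equals the indexed form
lemma pvRow_eq (n s : Int) :
    (PySem.List.pyRange n (n + 2 * s) 2).map (fun i => (i, i + 1))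
      = (PySem.List.pyRange 0 s 1).map (fun j => (n + 2 * j, n + 2 * j + 1)) := by
  rw [PySem.List.pyRange_of_pos n (n + 2 * s) (by norm_num),
      PySem.List.pyRange_of_pos 0 s (by norm_num)]
  by_cases hs : 0 < s
  · have h1 : n < n + 2 * s := by omega
    have h2 : (n + 2 * s - n + 2 - 1) / 2 = s := by omega
    have h3 : (s - 0 + 1 - 1) / 1 = s := by omega
    simp only [if_pos h1, if_pos hs, h2, h3, List.map_map]
    exact List.map_congr_left (fun k _ => by simp)
  · have h1 : ¬ n < n + 2 * s := by omega
    simp [h1, hs]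

lemma pvPairs_eq (start tot : Int) :
    pvPairs start tot = (PySem.List.pyRange 0 tot 1).map (fun j => (start + 2 * j, start + 2 * j + 1)) :=
  pvRow_eq start tot

-- pvF is maximal (= 2*size-1) exactly at the middle row index
lemma pvF_top_iff (size r : Int) : 2 * size - 1 ≤ pvF size r ↔ r = size - 1 := by
  simp only [pvF]
  rcases abs_cases (r - (size - 1)) with ⟨h1, h2⟩ | ⟨h1, h2⟩ <;> rw [h1] <;> omega

lemma pvF_succ_of_lt (size r : Int) (h : r < size - 1) : pvF size (r + 1) = pvF size r + 1 := by
  simp only [pvF]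
  rw [abs_of_nonpos (by omega), abs_of_nonpos (by omega)]; ring

lemma pvF_succ_of_ge (size r : Int) (h : size - 1 ≤ r) : pvF size (r + 1) = pvF size r - 1 := by
  simp only [pvF]
  rw [abs_of_nonneg (by omega), abs_of_nonneg (by omega)]; ring

-- one step of A, started in the invariant state for row index r, lands in the one for r+1
lemma pvStepA_invariant (size : Int) (r : Nat) (acc : List (List (Int × Int))) (n x : Int) :
    pvStepA (2 * size - 1) (acc, n, pvF size (r : Int), decide ((r : Int) ≤ size - 1)) x
      = (acc ++ [(PySem.List.pyRange 0 (pvF size (r : Int)) 1).map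
            (fun j => (n + 2 * j, n + 2 * j + 1))],
         n + 2 * pvF size (r : Int), pvF size ((r : Int) + 1),
         decide (((r : Int) + 1) ≤ size - 1)) := by
  simp only [pvStepA, pvRow_eq, Prod.mk.injEq]
  by_cases heq : (r : Int) = size - 1
  · have hc : 2 * size - 1 ≤ pvF size (r : Int) := (pvF_top_iff size _).mpr heq
    have h2 := pvF_succ_of_ge size (r : Int) (le_of_eq heq.symm)
    refine ⟨trivial, trivial, by simp [hc, h2], ?_⟩
    simp only [if_pos hc]
    have : ¬ ((r : Int) + 1 ≤ size - 1) := by omega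
    simp [this]
  · have hc : ¬ (2 * size - 1 ≤ pvF size (r : Int)) := fun h => heq ((pvF_top_iff size _).mp h)
    refine ⟨trivial, trivial, ?_, ?_⟩
    · simp only [if_neg hc]
      by_cases hu : (r : Int) ≤ size - 1
      · rw [pvF_succ_of_lt size (r : Int) (by omega)]; simp [hu]
      · rw [pvF_succ_of_ge size (r : Int) (by omega)]; simp [hu]
    · simp only [if_neg hc, decide_eq_decide]
      omega

-- main loop invariant: A's fold over k elements from row index r equals the pvStepB fold
-- over the size table for indices r, r+1, …, r+k-1
lemma pvLoop_eq (size : Int) : ∀ (k r : Nat) (l : List Int), l.length = k →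
    ∀ (acc : List (List (Int × Int))) (n : Int),
    (l.foldl (pvStepA (2 * size - 1)) (acc, n, pvF size (r : Int), decide ((r : Int) ≤ size - 1))).1
      = (((List.range' r k).map (fun j : Nat => pvF size (j : Int))).foldl pvStepB (acc, n)).1 := by
  intro k
  induction k with
  | zero => intro r l hl acc n; simp [List.length_eq_zero_iff.mp hl]
  | succ k ih =>
    intro r l hl acc n
    match l with
    | [] => simp at hl
    | x :: l' =>
      simp only [List.length_cons, Nat.succ.injEq] at hl
      rw [List.range'_succ, List.map_cons, List.foldl_cons, List.foldl_cons,
          pvStepA_invariant size r acc n x]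
      have := ih (r + 1) l' hl
        (acc ++ [(PySem.List.pyRange 0 (pvF size (r : Int)) 1).map
          (fun j => (n + 2 * j, n + 2 * j + 1))]) (n + 2 * pvF size (r : Int))
      simpa [pvStepB, Nat.cast_add, Nat.cast_one] using this

lemma pvA_eq_foldl (size : Int) :
    number_hexagonal_grid size
      = ((PySem.List.pyRange 0 (2 * size - 1) 1).foldl (pvStepA (2 * size - 1)) ([], 1, size, true)).1 := by
  rfl

-- splitting the flat pair list at the first row
lemma pvPairs_split (start s t : Int) (hs : 0 ≤ s) (ht : 0 ≤ t) :
    pvPairs start (s + t)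
      = (PySem.List.pyRange 0 s 1).map (fun j => (start + 2 * j, start + 2 * j + 1))
          ++ pvPairs (start + 2 * s) t := by
  rw [pvPairs_eq, pvPairs_eq,
      PySem.List.pyRange_one_append 0 s (s + t) hs (by omega), List.map_append]
  congr 1
  rw [PySem.List.pyRange_one 0 t, PySem.List.pyRange_one s (s + t), List.map_map, List.map_map]
  have hlen : (s + t - s).toNat = (t - 0).toNat := by omega
  rw [hlen]
  refine List.map_congr_left (fun k _ => ?_)
  simp only [Function.comp]
  rw [Prod.mk.injEq]
  constructor <;> ring

-- a slice of the flat pair list is exactly the row starting at start + 2*i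
lemma pvSliceRow (start i s t : Int) (hi : 0 ≤ i) (hs : 0 ≤ s) (ht : 0 ≤ t) :
    PySem.List.slice (pvPairs start (i + (s + t))) (some i) (some (i + s))
      = (PySem.List.pyRange 0 s 1).map
          (fun j => (start + 2 * i + 2 * j, start + 2 * i + 2 * j + 1)) := by
  have lenA : ((PySem.List.pyRange 0 i 1).map
      (fun j => (start + 2 * j, start + 2 * j + 1))).length = i.toNat := by
    simp [PySem.List.length_pyRange_one]
  have lenB : ((PySem.List.pyRange 0 s 1).map
      (fun j => (start + 2 * i + 2 * j, start + 2 * i + 2 * j + 1))).length = s.toNat := by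
    simp [PySem.List.length_pyRange_one]
  have hst : (i + s).toNat - i.toNat = s.toNat := by omega
  rw [pvPairs_split start i (s + t) hi (by omega),
      pvPairs_split (start + 2 * i) s t hs ht,
      PySem.List.slice_toNat _ hi (by omega),
      List.drop_left' lenA, hst, List.take_left' lenB]

-- the index-slicing fold over the sizes table equals the pvStepB fold
lemma pvChunkIdx (start T : Int) : ∀ (sizes : List Int), (∀ s ∈ sizes, 0 ≤ s) →
    ∀ (acc : List (List (Int × Int))) (i : Int), 0 ≤ i → i + sizes.sum ≤ T →
    (sizes.foldl
        (fun (st : List (List (Int × Int)) × Int) s =>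
          (st.1 ++ [PySem.List.slice (pvPairs start T) (some st.2) (some (st.2 + s))], st.2 + s))
        (acc, i)).1
      = (sizes.foldl pvStepB (acc, start + 2 * i)).1 := by
  intro sizes
  induction sizes with
  | nil => intro _ acc i _ _; rfl
  | cons s rest ih =>
    intro hnn acc i hi hle
    have hs : 0 ≤ s := hnn s (List.mem_cons_self ..)
    have ht : 0 ≤ rest.sum :=
      List.sum_nonneg (fun x hx => hnn x (List.mem_cons_of_mem _ hx))
    simp only [List.sum_cons] at hle
    have hT : T = i + (s + (T - i - s)) := by omega
    have hrow : PySem.List.slice (pvPairs start T) (some i) (some (i + s))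
        = (PySem.List.pyRange 0 s 1).map
            (fun j => (start + 2 * i + 2 * j, start + 2 * i + 2 * j + 1)) := by
      conv_lhs => rw [hT]
      exact pvSliceRow start i s (T - i - s) hi hs (by omega)
    simp only [List.foldl_cons, hrow, pvStepB]
    have h2 : start + 2 * i + 2 * s = start + 2 * (i + s) := by ring
    rw [h2]
    exact ih (fun x hx => hnn x (List.mem_cons_of_mem _ hx))
      (acc ++ [(PySem.List.pyRange 0 s 1).map
        (fun j => (start + 2 * i + 2 * j, start + 2 * i + 2 * j + 1))]) (i + s)
      (by omega) (by omega)

-- B's two-range size table equals the pvF table over row indices (for size ≥ 1)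
lemma pvSizes_eq (size : Int) (hpos : 1 ≤ size) :
    PySem.List.pyRange size (2 * size) 1 ++ PySem.List.pyRange (2 * size - 2) (size - 1) (-1)
      = (List.range' 0 (2 * size - 1).toNat).map (fun j : Nat => pvF size (j : Int)) := by
  rw [PySem.List.pyRange_one, PySem.List.pyRange_neg_one, ← List.range_eq_range']
  apply List.ext_getElem
  · simp; omega
  · intro k h1 h2
    simp only [List.getElem_map, List.getElem_range]
    by_cases hk : k < (2 * size - size).toNat
    · rw [List.getElem_append_left (by simpa using hk)]
      simp only [List.getElem_map, List.getElem_range]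
      simp only [pvF]
      rcases abs_cases ((k : Int) - (size - 1)) with ⟨h, _⟩ | ⟨h, _⟩ <;> rw [h] <;> omega
    · rw [List.getElem_append_right (by simpa using hk)]
      simp only [List.getElem_map, List.getElem_range, List.length_map, List.length_range]
      simp only [pvF]
      rcases abs_cases ((k : Int) - (size - 1)) with ⟨h, _⟩ | ⟨h, _⟩ <;> rw [h] <;> omega

-- ===== VERDICT (by name: the statement is the Claim_ definition above) =====
theorem number_hexagonal_grid_spec : Claim_equal_number_hexagonal_grid := by
  intro size _
  unfold Spec_number_hexagonal_grid number_hexagonal_grid_alt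
  rw [pvA_eq_foldl]
  by_cases hpos : 1 ≤ size
  · have hrange : PySem.List.pyRange 0 (2 * size - 1) 1
        = (List.range' 0 (2 * size - 1).toNat).map (fun k : Nat => (k : Int)) := by
      rw [PySem.List.pyRange_one, ← List.range_eq_range']
      simp only [sub_zero]
      exact List.map_congr_left (fun k _ => by omega)
    have hlen : ((List.range' 0 (2 * size - 1).toNat).map (fun k : Nat => (k : Int))).length
        = (2 * size - 1).toNat := by simp
    have hF0 : pvF size ((0 : Nat) : Int) = size := by
      simp only [pvF, Nat.cast_zero]
      rw [abs_of_nonpos (by omega)]; ring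
    have hU0 : decide (((0 : Nat) : Int) ≤ size - 1) = true := by
      simp only [Nat.cast_zero, decide_eq_true_eq]; omega
    have hmain := pvLoop_eq size (2 * size - 1).toNat 0
      ((List.range' 0 (2 * size - 1).toNat).map (fun k : Nat => (k : Int))) hlen [] 1
    rw [hF0, hU0] at hmain
    have hsz := pvSizes_eq size hpos
    have hnn : ∀ s ∈ PySem.List.pyRange size (2 * size) 1
        ++ PySem.List.pyRange (2 * size - 2) (size - 1) (-1), 0 ≤ s := by
      intro s hs
      rcases List.mem_append.mp hs with h | h
      · have := PySem.List.mem_pyRange_one.mp h; omega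
      · have := PySem.List.mem_pyRange_neg_one.mp h; omega
    have hchunk := pvChunkIdx 1 ((PySem.List.pyRange size (2 * size) 1
        ++ PySem.List.pyRange (2 * size - 2) (size - 1) (-1)).sum) _ hnn ([]) 0 le_rfl (by omega)
    rw [show (1 : Int) + 2 * 0 = 1 from by ring] at hchunk
    rw [hrange, hmain, ← hsz, ← hchunk]
    rfl
  · have hnil : PySem.List.pyRange 0 (2 * size - 1) 1 = [] :=
      PySem.List.pyRange_one_eq_nil (by omega)
    have hs1 : PySem.List.pyRange size (2 * size) 1 = [] :=
      PySem.List.pyRange_one_eq_nil (by omega)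
    have hs2 : PySem.List.pyRange (2 * size - 2) (size - 1) (-1) = [] :=
      PySem.List.pyRange_neg_one_eq_nil (by omega)
    simp [hnil, hs1, hs2]
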